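-- pv_equiv track=rewrite | github.com/Emasoft/emasoft-architect-agent | skills/eaa-planning-patterns/scripts/generate_status_report.py | calculate_phase_progress
-- ===== SOURCE A (Python) =====
-- from typing import Any, cast
-- from collections import defaultdict
--
-- def calculate_phase_progress(tasks: list[dict[str, Any]]) -> dict[str, dict[str, int]]:
--     """
--     Calculate progress statistics per phase.
--
--     Args:
--         tasks: List of task dictionaries
--
--     Returns:
--         Dictionary mapping phase names to progress stats
--     """
--     # WHY: Use defaultdict with lambda to auto-initialize stats for new phases,
--     # avoiding KeyError when encountering phases not seen before
--     phase_stats: dict[str, dict[str, int]] = defaultdict(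
--         lambda: {
--             "completed": 0,
--             "in-progress": 0,
--             "blocked": 0,
--             "pending": 0,
--             "total": 0,
--         }
--     )
--
--     for task in tasks:
--         phase = task.get("phase", "Unknown")
--         status = task.get("status", "pending")
--
--         phase_stats[phase]["total"] += 1
--
--         if status == "completed":
--             phase_stats[phase]["completed"] += 1
--         elif status == "in-progress":
--             phase_stats[phase]["in-progress"] += 1
--         elif status == "blocked":
--             phase_stats[phase]["blocked"] += 1
--         else:
--             phase_stats[phase]["pending"] += 1
--
--     return dict(phase_stats)
-- ===== SOURCE B (Python) =====
-- from collections import defaultdict, Counter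
--
--
-- def calculate_phase_progress(tasks):
--     # Group-then-tally: one pass collecting normalized statuses per phase,
--     # then a Counter-based tally per phase. Phase order = first encounter.
--     groups = defaultdict(list)
--     for task in tasks:
--         phase = task.get("phase", "Unknown")
--         status = task.get("status", "pending")
--         if status not in ("completed", "in-progress", "blocked"):
--             status = "pending"
--         groups[phase].append(status)
--
--     result = {}
--     for phase, statuses in groups.items():
--         c = Counter(statuses)
--         result[phase] = {
--             "completed": c["completed"],
--             "in-progress": c["in-progress"],
--             "blocked": c["blocked"],
--             "pending": c["pending"],
--             "total": len(statuses),
--         }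
--     return result
-- ===== Notes on version B (the rewrite author's own statement) =====
-- stated objective: idiomatic
-- what changed: Replaces the single scan that mutates per-phase counter dicts in place with a two-phase group-then-tally decomposition: first build phase -> list of normalized statuses, then tally each group with collections.Counter.
import Mathlib
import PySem

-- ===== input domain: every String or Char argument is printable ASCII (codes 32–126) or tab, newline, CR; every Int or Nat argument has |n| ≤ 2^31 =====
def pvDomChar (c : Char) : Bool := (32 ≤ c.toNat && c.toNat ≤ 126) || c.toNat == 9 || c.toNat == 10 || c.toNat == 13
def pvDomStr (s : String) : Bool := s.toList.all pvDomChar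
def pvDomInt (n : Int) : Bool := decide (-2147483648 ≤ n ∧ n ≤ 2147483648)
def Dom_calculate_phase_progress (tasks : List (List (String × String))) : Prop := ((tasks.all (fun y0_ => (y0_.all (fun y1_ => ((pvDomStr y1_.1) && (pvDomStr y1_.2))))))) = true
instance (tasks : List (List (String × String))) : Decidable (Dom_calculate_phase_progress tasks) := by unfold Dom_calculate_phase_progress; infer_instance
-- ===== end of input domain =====

-- B replaces A's single in-place counter-mutating scan with a group-then-tally
-- decomposition (phase -> normalized status list, then a Counter per phase); same cost, more idiomatic.


-- ===== PORT A =====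
-- task.get(k, dflt): first-match lookup in the task's association list
def pvTaskGet (task : List (String × String)) (k dflt : String) : String :=
  (PySem.Dict.mk task).getD k dflt

-- the defaultdict's initial stats dict
def pvInit : PySem.Dict String Int :=
  PySem.Dict.mk [("completed", 0), ("in-progress", 0), ("blocked", 0), ("pending", 0), ("total", 0)]

-- the body of A's loop acting on one phase's stats dict
def pvAUpdate (st : PySem.Dict String Int) (status : String) : PySem.Dict String Int :=
  let st := st.insert "total" (st.getD "total" 0 + 1)
  if status = "completed" then st.insert "completed" (st.getD "completed" 0 + 1)
  else if status = "in-progress" then st.insert "in-progress" (st.getD "in-progress" 0 + 1)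
  else if status = "blocked" then st.insert "blocked" (st.getD "blocked" 0 + 1)
  else st.insert "pending" (st.getD "pending" 0 + 1)

def calculate_phase_progress (tasks : List (List (String × String))) : List (String × List (String × Int)) :=
  let phase_stats : PySem.Dict String (PySem.Dict String Int) :=
    tasks.foldl (fun d task =>
      let phase := pvTaskGet task "phase" "Unknown"
      let status := pvTaskGet task "status" "pending"
      d.modify phase pvInit (fun st => pvAUpdate st status)) PySem.Dict.empty
  phase_stats.items.map (fun q => (q.1, q.2.items))

-- ===== PORT B =====
-- status normalization: anything outside the three known statuses becomes "pending"
def pvNorm (status : String) : String :=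
  if status = "completed" ∨ status = "in-progress" ∨ status = "blocked" then status else "pending"

def calculate_phase_progress_alt (tasks : List (List (String × String))) : List (String × List (String × Int)) :=
  let groups : PySem.Dict String (List String) :=
    tasks.foldl (fun g task =>
      let phase := pvTaskGet task "phase" "Unknown"
      let status := pvNorm (pvTaskGet task "status" "pending")
      g.modify phase [] (· ++ [status])) PySem.Dict.empty
  groups.items.map (fun q =>
    let c := PySem.Dict.counter q.2
    (q.1, [("completed", c.getD "completed" 0), ("in-progress", c.getD "in-progress" 0),
           ("blocked", c.getD "blocked" 0), ("pending", c.getD "pending" 0),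
           ("total", (q.2.length : Int))]))

-- ===== PRECONDITION & SPEC =====
def Spec_calculate_phase_progress (tasks : List (List (String × String))) (out : List (String × List (String × Int))) : Prop := out = calculate_phase_progress_alt tasks
instance (tasks : List (List (String × String))) (out : List (String × List (String × Int))) : Decidable (Spec_calculate_phase_progress tasks out) := by unfold Spec_calculate_phase_progress; infer_instance

-- ===== CLAIM (what is proved, stated in full; the proofs are below) =====
def Claim_equal_calculate_phase_progress : Prop := ∀ (tasks : List (List (String × String))), Dom_calculate_phase_progress tasks → Spec_calculate_phase_progress tasks (calculate_phase_progress tasks)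

-- ===== LEMMAS AND PROOFS =====

-- the stats dict that A's state holds for a phase whose normalized statuses are ss
def pvStats (ss : List String) : PySem.Dict String Int :=
  PySem.Dict.mk [("completed", (ss.count "completed" : Int)), ("in-progress", (ss.count "in-progress" : Int)),
                 ("blocked", (ss.count "blocked" : Int)), ("pending", (ss.count "pending" : Int)),
                 ("total", (ss.length : Int))]

-- A's state rendered from B's grouping state
def pvRender (g : PySem.Dict String (List String)) : PySem.Dict String (PySem.Dict String Int) :=
  PySem.Dict.mk (g.items.map (fun q => (q.1, pvStats q.2)))

theorem pvStats_nil : pvStats [] = pvInit := by decide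

theorem pvContains_render (g : PySem.Dict String (List String)) (k : String) :
    (pvRender g).contains k = g.contains k := by
  simp [pvRender, PySem.Dict.contains, List.any_map, Function.comp_def]

theorem pvGetD_render (g : PySem.Dict String (List String)) (k : String) :
    (pvRender g).getD k pvInit = pvStats (g.getD k []) := by
  simp only [pvRender, PySem.Dict.getD, PySem.Dict.get?]
  rw [List.find?_map]
  have hpred : ((fun p => p.1 == k) ∘ fun q : String × List String => (q.1, pvStats q.2))
      = fun p => p.1 == k := by funext q; simp [Function.comp_def]
  rw [hpred]
  cases h : List.find? (fun p => p.1 == k) g.items with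
  | none => simp [pvStats_nil]
  | some p => simp

theorem pvInsert_render (g : PySem.Dict String (List String)) (k : String) (v : List String) :
    (pvRender g).insert k (pvStats v) = pvRender (g.insert k v) := by
  simp only [PySem.Dict.insert, pvContains_render]
  by_cases h : g.contains k = true
  · simp only [h, if_true, pvRender, List.map_map]
    congr 1
    apply List.map_congr_left
    intro q _
    by_cases hq : (q.1 == k) = true <;> simp [Function.comp, hq]
  · simp [h, pvRender]

theorem pvAUpdate_stats (ss : List String) (status : String) :
    pvAUpdate (pvStats ss) status = pvStats (ss ++ [pvNorm status]) := by
  by_cases h1 : status = "completed"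
  · subst h1; simp [pvAUpdate, pvStats, pvNorm, PySem.Dict.insert, PySem.Dict.getD,
      PySem.Dict.get?, PySem.Dict.contains, List.count_append]
  · by_cases h2 : status = "in-progress"
    · subst h2; simp [pvAUpdate, pvStats, pvNorm, PySem.Dict.insert, PySem.Dict.getD,
        PySem.Dict.get?, PySem.Dict.contains, List.count_append]
    · by_cases h3 : status = "blocked"
      · subst h3; simp [pvAUpdate, pvStats, pvNorm, PySem.Dict.insert, PySem.Dict.getD,
          PySem.Dict.get?, PySem.Dict.contains, List.count_append]
      · simp [pvAUpdate, pvStats, pvNorm, h1, h2, h3, PySem.Dict.insert, PySem.Dict.getD,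
          PySem.Dict.get?, PySem.Dict.contains, List.count_append]

theorem pvStep_render (g : PySem.Dict String (List String)) (p status : String) :
    (pvRender g).modify p pvInit (fun st => pvAUpdate st status)
      = pvRender (g.modify p [] (· ++ [pvNorm status])) := by
  simp only [PySem.Dict.modify, pvGetD_render, pvAUpdate_stats, pvInsert_render]

theorem pvFold_render (tasks : List (List (String × String))) (g : PySem.Dict String (List String)) :
    tasks.foldl (fun d task =>
        d.modify (pvTaskGet task "phase" "Unknown") pvInit
          (fun st => pvAUpdate st (pvTaskGet task "status" "pending"))) (pvRender g)
      = pvRender (tasks.foldl (fun g task =>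
          g.modify (pvTaskGet task "phase" "Unknown") [] (· ++ [pvNorm (pvTaskGet task "status" "pending")])) g) := by
  induction tasks generalizing g with
  | nil => rfl
  | cons t ts ih =>
    simp only [List.foldl_cons, pvStep_render, ih]

theorem pvStats_items (ss : List String) :
    (pvStats ss).items
      = [("completed", ((PySem.Dict.counter ss).getD "completed" 0 : Int)),
         ("in-progress", (PySem.Dict.counter ss).getD "in-progress" 0),
         ("blocked", (PySem.Dict.counter ss).getD "blocked" 0),
         ("pending", (PySem.Dict.counter ss).getD "pending" 0),
         ("total", (ss.length : Int))] := by
  simp [pvStats, PySem.Dict.getD_counter]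

-- ===== VERDICT (by name: the statement is the Claim_ definition above) =====
theorem calculate_phase_progress_spec : Claim_equal_calculate_phase_progress := by
  intro tasks _
  show calculate_phase_progress tasks = calculate_phase_progress_alt tasks
  unfold calculate_phase_progress calculate_phase_progress_alt
  have hempty : (PySem.Dict.empty : PySem.Dict String (PySem.Dict String Int)) = pvRender PySem.Dict.empty := rfl
  rw [hempty, pvFold_render]
  simp only [pvRender, List.map_map]
  apply List.map_congr_left
  intro q _
  simp [Function.comp, pvStats_items]
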